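-- pv_equiv track=rewrite | github.com/RafalLeja/UWr | SI/pracownia1/zad5.py | failedCols
-- ===== SOURCE A (Python) =====
-- def blockCount(L):
--   s = 0
--   for i in L:
--     if i == '#':
--       s += 1
--   return s
--
-- def failedCols(board, cols):
--   fCols = []
--   for c in range(len(cols)):
--     col = []
--     for r in range(len(board)):
--       col.append(board[r][c])
--     if blockCount(col) != cols[c]:
--       fCols.append(c)
--   return fCols
-- ===== SOURCE B (Python) =====
-- def failedCols(board, cols):
--     counts = [0] * len(cols)
--     for row in board:
--         for c in range(len(cols)):
--             if row[c] == '#':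
--                 counts[c] += 1
--     return [c for c in range(len(cols)) if counts[c] != cols[c]]
-- ===== Notes on version B (the rewrite author's own statement) =====
-- stated objective: simpler
-- what changed: Replaces the per-column rebuild (materialize each column as a list, then rescan it with blockCount) by one row-major accumulation into a counts table plus a final comparison pass, removing the blockCount helper and the column lists.
import Mathlib
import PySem

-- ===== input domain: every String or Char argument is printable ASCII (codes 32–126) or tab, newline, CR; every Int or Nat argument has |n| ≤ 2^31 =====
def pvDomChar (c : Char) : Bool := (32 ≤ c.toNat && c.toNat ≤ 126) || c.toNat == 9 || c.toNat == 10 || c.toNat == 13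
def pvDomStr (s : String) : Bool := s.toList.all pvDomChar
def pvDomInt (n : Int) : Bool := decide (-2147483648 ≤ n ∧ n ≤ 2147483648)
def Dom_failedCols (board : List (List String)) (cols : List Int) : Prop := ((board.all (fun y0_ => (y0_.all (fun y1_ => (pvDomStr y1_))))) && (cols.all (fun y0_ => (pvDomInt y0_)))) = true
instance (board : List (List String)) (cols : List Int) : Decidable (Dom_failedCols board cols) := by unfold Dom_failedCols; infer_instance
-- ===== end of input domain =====

-- B replaces A's per-column rebuild-and-rescan (blockCount over a materialized column list)
-- by a single row-major accumulation into a counts table plus one comparison pass (simpler).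


-- ===== PORT A =====
-- helper blockCount from A
def pvBlockCount (L : List String) : Int :=
  L.foldl (fun s i => if i == "#" then s + 1 else s) 0

def failedCols (board : List (List String)) (cols : List Int) : List Int :=
  (List.range cols.length).foldl
    (fun fCols c =>
      let col := (List.range board.length).foldl
        (fun col r => col ++ [(board.getD r []).getD c ""]) []
      if pvBlockCount col ≠ cols.getD c 0 then fCols ++ [(c : Int)] else fCols)
    []

-- ===== PORT B =====
-- counts table of B: counts = [0]*len(cols); for each row, counts[c] += (row[c] == '#')
def pvCounts (board : List (List String)) (n : ℕ) : List Int :=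
  board.foldl
    (fun counts row =>
      (List.range n).foldl
        (fun counts c =>
          if row.getD c "" == "#" then counts.set c (counts.getD c 0 + 1) else counts)
        counts)
    (List.replicate n (0 : Int))

def failedCols_alt (board : List (List String)) (cols : List Int) : List Int :=
  (List.range cols.length).filterMap
    (fun c => if (pvCounts board cols.length).getD c 0 ≠ cols.getD c 0 then some (c : Int) else none)

-- ===== PRECONDITION & SPEC =====
-- A (and B) raises IndexError iff some row is shorter than len(cols); exactly those inputs are excluded.
def Pre_failedCols (board : List (List String)) (cols : List Int) : Prop :=
  ∀ row ∈ board, cols.length ≤ row.length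
instance (board : List (List String)) (cols : List Int) : Decidable (Pre_failedCols board cols) := by unfold Pre_failedCols; infer_instance
def pvWitness_failedCols : List (List String) × List Int := ([["#", "."], [".", "#"]], [1, 2])

def Spec_failedCols (board : List (List String)) (cols : List Int) (out : List Int) : Prop := out = failedCols_alt board cols
instance (board : List (List String)) (cols : List Int) (out : List Int) : Decidable (Spec_failedCols board cols out) := by unfold Spec_failedCols; infer_instance

-- ===== CLAIM (what is proved, stated in full; the proofs are below) =====
def Claim_equal_failedCols : Prop := ∀ (board : List (List String)) (cols : List Int), Dom_failedCols board cols → Pre_failedCols board cols → Spec_failedCols board cols (failedCols board cols)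

-- ===== LEMMAS AND PROOFS =====

-- A's blockCount counts the '#' entries
theorem pvBlockCount_foldl (L : List String) (s : Int) :
    L.foldl (fun s i => if i == "#" then s + 1 else s) s = s + (L.countP (· == "#") : Int) := by
  induction L generalizing s with
  | nil => simp
  | cons a L ih => simp only [List.foldl_cons, List.countP_cons, ih]; split_ifs <;> push_cast <;> ring

-- B's inner loop preserves the length of counts
theorem innerLoop_length (row : List String) (l : List ℕ) (counts : List Int) :
    (l.foldl (fun counts c => if row.getD c "" == "#" then counts.set c (counts.getD c 0 + 1) else counts) counts).length = counts.length := by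
  induction l generalizing counts with
  | nil => rfl
  | cons j l ih =>
    simp only [List.foldl_cons]
    split_ifs
    · rw [ih, List.length_set]
    · exact ih _

-- entry c after B's inner loop: old value plus (multiplicity of c in l) · [row[c] == '#']
theorem innerLoop_getD (row : List String) (l : List ℕ) (counts : List Int) (c : ℕ) (hc : c < counts.length) :
    (l.foldl (fun counts c => if row.getD c "" == "#" then counts.set c (counts.getD c 0 + 1) else counts) counts).getD c 0
      = counts.getD c 0 + (l.count c : Int) * (if row.getD c "" == "#" then 1 else 0) := by
  induction l generalizing counts with
  | nil => simp
  | cons j l ih =>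
    simp only [List.foldl_cons, List.count_cons]
    by_cases h : (row.getD j "" == "#") = true
    · rw [if_pos h, ih _ (by rw [List.length_set]; exact hc)]
      by_cases hj : j = c
      · subst hj
        have hset : (counts.set j (counts.getD j 0 + 1)).getD j 0 = counts.getD j 0 + 1 := by
          simp [List.getD_eq_getElem?_getD, hc]
        rw [hset]
        simp only [h, beq_self_eq_true, if_pos]
        push_cast; ring
      · have hset : (counts.set j (counts.getD j 0 + 1)).getD c 0 = counts.getD c 0 := by
          simp [List.getD_eq_getElem?_getD, hj]
        rw [hset]
        simp only [beq_iff_eq, hj, if_false]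
        push_cast; ring
    · rw [if_neg h, ih _ hc]
      by_cases hj : j = c
      · subst hj
        simp only [h, beq_self_eq_true, if_true]
        push_cast; ring
      · simp only [beq_iff_eq, hj, if_false]
        push_cast; ring

-- entry c after B's outer loop over all rows
theorem outerLoop_getD (board : List (List String)) (n : ℕ) (counts : List Int) (c : ℕ)
    (hc : c < n) (hlen : counts.length = n) :
    (board.foldl
      (fun counts row =>
        (List.range n).foldl
          (fun counts c => if row.getD c "" == "#" then counts.set c (counts.getD c 0 + 1) else counts)
          counts)
      counts).getD c 0
      = counts.getD c 0 + (board.countP (fun row => row.getD c "" == "#") : Int) := by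
  induction board generalizing counts with
  | nil => simp
  | cons row board ih =>
    simp only [List.foldl_cons, List.countP_cons]
    rw [ih _ (by rw [innerLoop_length, hlen]),
        innerLoop_getD _ _ _ _ (by rw [hlen]; exact hc),
        List.count_range, if_pos hc]
    split_ifs with h <;> push_cast <;> ring

-- A's materialized column c is the map of row ↦ row[c] over the board
theorem colFold_eq_map (board : List (List String)) (c : ℕ) :
    (List.range board.length).foldl (fun col r => col ++ [(board.getD r []).getD c ""]) []
      = board.map (fun row => row.getD c "") := by
  rw [PySem.List.foldl_append_singleton_eq_map]
  apply List.ext_getElem (by simp)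
  intro i h1 h2
  simp [List.getD_eq_getElem?_getD, List.getElem?_eq_getElem (by simpa using h2)]

-- append-if accumulation equals a filterMap, given pointwise agreement of the tests on the list
theorem foldl_if_eq_filterMap (l : List ℕ) (acc : List Int) (p q : ℕ → Prop)
    [DecidablePred p] [DecidablePred q] (h : ∀ x ∈ l, p x ↔ q x) :
    l.foldl (fun acc c => if p c then acc ++ [(c : Int)] else acc) acc
      = acc ++ l.filterMap (fun c => if q c then some (c : Int) else none) := by
  induction l generalizing acc with
  | nil => simp
  | cons j l ih =>
    have hj := h j (by simp)
    simp only [List.foldl_cons, List.filterMap_cons]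
    by_cases hpj : p j
    · rw [if_pos hpj, if_pos (hj.mp hpj), ih _ (fun x hx => h x (by simp [hx]))]; simp
    · rw [if_neg hpj, if_neg (fun hq => hpj (hj.mpr hq)), ih _ (fun x hx => h x (by simp [hx]))]

-- ===== VERDICT (by name: the statement is the Claim_ definition above) =====
theorem failedCols_spec : Claim_equal_failedCols := by
  intro board cols _ _
  show failedCols board cols = failedCols_alt board cols
  unfold failedCols failedCols_alt
  rw [foldl_if_eq_filterMap _ _ _
        (fun c => (pvCounts board cols.length).getD c 0 ≠ cols.getD c 0) ?_,
      List.nil_append]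
  intro c hc
  have hcn : c < cols.length := List.mem_range.mp hc
  have hcounts : (pvCounts board cols.length).getD c 0
      = (board.countP (fun row => row.getD c "" == "#") : Int) := by
    unfold pvCounts
    rw [outerLoop_getD board cols.length _ c hcn (by simp)]
    simp [List.getD_eq_getElem?_getD, hcn]
  rw [colFold_eq_map]
  unfold pvBlockCount
  rw [pvBlockCount_foldl, List.countP_map]
  simp only [List.getD_eq_getElem?_getD, Function.comp_def] at hcounts ⊢
  rw [hcounts]
  omega
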